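-- pv_equiv track=rewrite | github.com/mariosrafail/kw2026 | tools/check_rpc_surface.py | compare_signature_sets
-- ===== SOURCE A (Python) =====
-- def compare_signature_sets(label: str, canonical: dict[str, dict[str, str]], other: dict[str, dict[str, str]]) -> list[str]:
--     errors: list[str] = []
--     missing = sorted(set(canonical.keys()) - set(other.keys()))
--     extra = sorted(set(other.keys()) - set(canonical.keys()))
--     if missing:
--         errors.append(f"{label}: missing methods: {', '.join(missing)}")
--     if extra:
--         errors.append(f"{label}: unexpected methods: {', '.join(extra)}")
--     for method_name in sorted(set(canonical.keys()) & set(other.keys())):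
--         canonical_sig = canonical[method_name]["signature"]
--         other_sig = other[method_name]["signature"]
--         if canonical_sig != other_sig:
--             errors.append(
--                 f"{label}: signature mismatch for {method_name}: canonical {canonical_sig} != {other_sig}"
--             )
--     return errors
-- ===== SOURCE B (Python) =====
-- def compare_signature_sets(label: str, canonical: dict[str, dict[str, str]], other: dict[str, dict[str, str]]) -> list[str]:
--     # Two-pointer merge of the two independently sorted key lists: no set
--     # differences/intersections, no membership tests at all.
--     ck = sorted(canonical.keys())
--     ok = sorted(other.keys())
--     missing: list[str] = []
--     extra: list[str] = []
--     mismatches: list[str] = []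
--     i = j = 0
--     while i < len(ck) and j < len(ok):
--         a, b = ck[i], ok[j]
--         if a < b:
--             missing.append(a)
--             i += 1
--         elif b < a:
--             extra.append(b)
--             j += 1
--         else:
--             canonical_sig = canonical[a]["signature"]
--             other_sig = other[a]["signature"]
--             if canonical_sig != other_sig:
--                 mismatches.append(
--                     f"{label}: signature mismatch for {a}: canonical {canonical_sig} != {other_sig}"
--                 )
--             i += 1
--             j += 1
--     missing.extend(ck[i:])
--     extra.extend(ok[j:])
--     errors: list[str] = []
--     if missing:
--         errors.append(f"{label}: missing methods: {', '.join(missing)}")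
--     if extra:
--         errors.append(f"{label}: unexpected methods: {', '.join(extra)}")
--     return errors + mismatches
-- ===== Notes on version B (the rewrite author's own statement) =====
-- stated objective: alternative
-- what changed: Replaces A's set differences/intersection (three set constructions and three sorts, with hash lookups) by a classic two-pointer merge of the two independently sorted key lists that classifies each key by order comparison alone, with no set objects and no membership tests.
import Mathlib
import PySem

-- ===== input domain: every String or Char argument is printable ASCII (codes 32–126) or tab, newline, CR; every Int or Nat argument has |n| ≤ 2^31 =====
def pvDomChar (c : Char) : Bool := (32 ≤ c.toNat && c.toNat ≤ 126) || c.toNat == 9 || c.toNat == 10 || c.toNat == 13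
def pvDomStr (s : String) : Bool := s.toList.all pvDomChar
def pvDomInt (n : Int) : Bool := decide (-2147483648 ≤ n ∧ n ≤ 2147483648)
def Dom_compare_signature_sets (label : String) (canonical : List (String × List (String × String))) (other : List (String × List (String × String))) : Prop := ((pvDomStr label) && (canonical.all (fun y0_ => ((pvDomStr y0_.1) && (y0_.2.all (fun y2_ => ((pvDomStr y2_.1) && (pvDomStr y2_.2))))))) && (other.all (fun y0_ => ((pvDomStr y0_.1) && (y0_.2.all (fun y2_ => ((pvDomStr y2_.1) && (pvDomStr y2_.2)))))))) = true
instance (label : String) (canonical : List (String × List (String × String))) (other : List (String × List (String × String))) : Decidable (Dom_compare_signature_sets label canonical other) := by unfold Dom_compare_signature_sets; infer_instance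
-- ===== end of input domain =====

-- B replaces A's set differences/intersection and three sorts by a two-pointer merge of the two
-- independently sorted key lists (objective: alternative algorithm, same asymptotic cost).

-- ===== PORT A =====
-- dict arguments become PySem.Dicts (insertion order, duplicate keys: last value wins)
def compare_signature_sets (label : String) (canonical : List (String × List (String × String))) (other : List (String × List (String × String))) : List String :=
  let cd := PySem.Dict.ofList canonical
  let od := PySem.Dict.ofList other
  let errors : List String := []
  let missing := PySem.List.sorted (PySem.Set.diff (PySem.Set.ofList cd.keys) (PySem.Set.ofList od.keys)) (fun x => x) false
  let extra := PySem.List.sorted (PySem.Set.diff (PySem.Set.ofList od.keys) (PySem.Set.ofList cd.keys)) (fun x => x) false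
  let errors := if missing.isEmpty then errors else errors ++ [label ++ ": missing methods: " ++ PySem.Str.join ", " missing]
  let errors := if extra.isEmpty then errors else errors ++ [label ++ ": unexpected methods: " ++ PySem.Str.join ", " extra]
  (PySem.List.sorted (PySem.Set.inter (PySem.Set.ofList cd.keys) (PySem.Set.ofList od.keys)) (fun x => x) false).foldl
    (fun errors method_name =>
      -- canonical[method_name]["signature"]: KeyError (= get? none) is excluded by Pre_; '.getD ""' totalizes
      let canonical_sig := ((PySem.Dict.ofList (cd.getD method_name [])).get? "signature").getD ""
      let other_sig := ((PySem.Dict.ofList (od.getD method_name [])).get? "signature").getD ""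
      if canonical_sig != other_sig then
        errors ++ [label ++ ": signature mismatch for " ++ method_name ++ ": canonical " ++ canonical_sig ++ " != " ++ other_sig]
      else errors) errors

-- ===== PORT B =====
-- B's while loop over indices i, j: ported as the obvious structural recursion on the two
-- remaining suffixes ck[i:], ok[j:]; the three accumulator lists come back as a triple.
def pvMergeB (label : String) (cd od : PySem.Dict String (List (String × String))) : List String → List String → List String × List String × List String
  | [], ys => ([], ys, [])                    -- missing.extend(ck[i:]) / extra.extend(ok[j:])
  | x :: xs, [] => (x :: xs, [], [])
  | x :: xs, y :: ys =>
    if x < y then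
      let r := pvMergeB label cd od xs (y :: ys)
      (x :: r.1, r.2.1, r.2.2)
    else if y < x then
      let r := pvMergeB label cd od (x :: xs) ys
      (r.1, y :: r.2.1, r.2.2)
    else
      -- canonical[a]["signature"]: KeyError excluded by Pre_; '.getD ""' totalizes
      let canonical_sig := ((PySem.Dict.ofList (cd.getD x [])).get? "signature").getD ""
      let other_sig := ((PySem.Dict.ofList (od.getD x [])).get? "signature").getD ""
      let r := pvMergeB label cd od xs ys
      (r.1, r.2.1,
       (if canonical_sig != other_sig then
          [label ++ ": signature mismatch for " ++ x ++ ": canonical " ++ canonical_sig ++ " != " ++ other_sig]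
        else []) ++ r.2.2)
  termination_by xs ys => xs.length + ys.length

def compare_signature_sets_alt (label : String) (canonical : List (String × List (String × String))) (other : List (String × List (String × String))) : List String :=
  let cd := PySem.Dict.ofList canonical
  let od := PySem.Dict.ofList other
  let ck := PySem.List.sorted cd.keys (fun x => x) false
  let ok := PySem.List.sorted od.keys (fun x => x) false
  let r := pvMergeB label cd od ck ok
  let errors :=
    (if r.1.isEmpty then [] else [label ++ ": missing methods: " ++ PySem.Str.join ", " r.1]) ++
    (if r.2.1.isEmpty then [] else [label ++ ": unexpected methods: " ++ PySem.Str.join ", " r.2.1])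
  errors ++ r.2.2

-- ===== PRECONDITION & SPEC =====
-- Pre_ excludes exactly the inputs where Python A raises KeyError: some method name present in
-- both dicts whose effective inner dict (on either side) has no "signature" key.
def Pre_compare_signature_sets (label : String) (canonical : List (String × List (String × String))) (other : List (String × List (String × String))) : Prop :=
  ∀ k ∈ (PySem.Dict.ofList canonical).keys,
    (PySem.Dict.ofList other).contains k = true →
      ((PySem.Dict.ofList ((PySem.Dict.ofList canonical).getD k [])).contains "signature" = true ∧
       (PySem.Dict.ofList ((PySem.Dict.ofList other).getD k [])).contains "signature" = true)
instance (label : String) (canonical : List (String × List (String × String))) (other : List (String × List (String × String))) : Decidable (Pre_compare_signature_sets label canonical other) := by unfold Pre_compare_signature_sets; infer_instance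

def pvWitness_compare_signature_sets : String × (List (String × List (String × String))) × (List (String × List (String × String))) :=
  ("rpc", [("ping", [("signature", "(self)")]), ("stop", [("signature", "(self)")])],
          [("ping", [("signature", "(self, x)")]), ("go", [("signature", "(self)")])])

def Spec_compare_signature_sets (label : String) (canonical : List (String × List (String × String))) (other : List (String × List (String × String))) (out : List String) : Prop := out = compare_signature_sets_alt label canonical other
instance (label : String) (canonical : List (String × List (String × String))) (other : List (String × List (String × String))) (out : List String) : Decidable (Spec_compare_signature_sets label canonical other out) := by unfold Spec_compare_signature_sets; infer_instance

-- ===== CLAIM (what is proved, stated in full; the proofs are below) =====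
def Claim_equal_compare_signature_sets : Prop := ∀ (label : String) (canonical : List (String × List (String × String))) (other : List (String × List (String × String))), Dom_compare_signature_sets label canonical other → Pre_compare_signature_sets label canonical other → Spec_compare_signature_sets label canonical other (compare_signature_sets label canonical other)

-- ===== LEMMAS AND PROOFS =====

-- the signature looked up for a shared method name, totalized
def pvSig (d : PySem.Dict String (List (String × String))) (n : String) : String :=
  ((PySem.Dict.ofList (d.getD n [])).get? "signature").getD ""

def pvLine (label : String) (cd od : PySem.Dict String (List (String × String))) (n : String) : String :=
  label ++ ": signature mismatch for " ++ n ++ ": canonical " ++ pvSig cd n ++ " != " ++ pvSig od n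

-- A's mismatch loop, as a named step
def pvStepA (label : String) (cd od : PySem.Dict String (List (String × String))) (errors : List String) (n : String) : List String :=
  if pvSig cd n != pvSig od n then errors ++ [pvLine label cd od n] else errors

lemma pvFoldA (label : String) (cd od : PySem.Dict String (List (String × String))) (l : List String) (acc : List String) :
    l.foldl (pvStepA label cd od) acc = acc ++ (l.filter (fun n => pvSig cd n != pvSig od n)).map (pvLine label cd od) := by
  induction l generalizing acc with
  | nil => simp
  | cons x xs ih =>
    simp only [List.foldl_cons, List.filter_cons, pvStepA]
    by_cases h : (pvSig cd x != pvSig od x) = true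
    · simp [h, ih]
    · simp [h, ih]

-- the merge on two strictly sorted lists computes the two set differences and the
-- mismatch lines over the intersection, each in sorted order
lemma pvMergeB_eq (label : String) (cd od : PySem.Dict String (List (String × String))) :
    ∀ (xs ys : List String), xs.Pairwise (· < ·) → ys.Pairwise (· < ·) →
    pvMergeB label cd od xs ys =
      (xs.filter (fun a => !ys.contains a),
       ys.filter (fun a => !xs.contains a),
       ((xs.filter (fun a => ys.contains a)).filter (fun n => pvSig cd n != pvSig od n)).map (pvLine label cd od)) := by
  intro xs ys
  induction xs, ys using pvMergeB.induct label cd od with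
  | case1 ys => intro _ _; simp [pvMergeB]
  | case2 x xs => intro _ _; simp [pvMergeB]
  | case3 x xs y ys hlt ih =>
    intro hxs hys
    obtain ⟨hx1, hxs'⟩ := List.pairwise_cons.mp hxs
    obtain ⟨hy1, hys'⟩ := List.pairwise_cons.mp hys
    have hxlt : ∀ a ∈ y :: ys, x < a := by
      intro a ha
      rcases List.mem_cons.mp ha with h | h
      · exact h ▸ hlt
      · exact lt_trans hlt (hy1 a h)
    have hnm : x ∉ y :: ys := fun h => lt_irrefl x (hxlt x h)
    have hcongr : ∀ a ∈ y :: ys, ((x :: xs).contains a) = (xs.contains a) := by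
      intro a ha
      have hne : a ≠ x := fun he => lt_irrefl x (he ▸ hxlt a ha)
      simp [List.contains_cons, hne]
    have e2 : (y :: ys).filter (fun a => !(x :: xs).contains a) = (y :: ys).filter (fun a => !xs.contains a) :=
      List.filter_congr (fun a ha => by rw [hcongr a ha])
    have hc : ((y :: ys).contains x) = false := by simpa using hnm
    have hnm' : ¬(x = y ∨ x ∈ ys) := by simpa using hnm
    simp only [pvMergeB, if_pos hlt]
    rw [ih hxs' hys, e2]
    simp [List.filter_cons, hc, hnm', List.filter_filter, Bool.and_comm]
    all_goals exact not_or.mp hnm'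
  | case4 x xs y ys hnlt hlt ih =>
    intro hxs hys
    obtain ⟨hx1, hxs'⟩ := List.pairwise_cons.mp hxs
    obtain ⟨hy1, hys'⟩ := List.pairwise_cons.mp hys
    have hylt : ∀ a ∈ x :: xs, y < a := by
      intro a ha
      rcases List.mem_cons.mp ha with h | h
      · exact h ▸ hlt
      · exact lt_trans hlt (hx1 a h)
    have hnm : y ∉ x :: xs := fun h => lt_irrefl y (hylt y h)
    have hcongr : ∀ a ∈ x :: xs, ((y :: ys).contains a) = (ys.contains a) := by
      intro a ha
      have hne : a ≠ y := fun he => lt_irrefl y (he ▸ hylt a ha)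
      simp [List.contains_cons, hne]
    have e1 : (x :: xs).filter (fun a => !(y :: ys).contains a) = (x :: xs).filter (fun a => !ys.contains a) :=
      List.filter_congr (fun a ha => by rw [hcongr a ha])
    have e3 : (x :: xs).filter (fun a => (y :: ys).contains a) = (x :: xs).filter (fun a => ys.contains a) :=
      List.filter_congr (fun a ha => by rw [hcongr a ha])
    have hc : ((x :: xs).contains y) = false := by simpa using hnm
    have hnm' : ¬(y = x ∨ y ∈ xs) := by simpa using hnm
    simp only [pvMergeB, if_neg hnlt, if_pos hlt]
    rw [ih hxs hys', e1, e3]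
    simp [List.filter_cons, hc, hnm', List.filter_filter, Bool.and_comm]
    all_goals exact not_or.mp hnm'
  | case5 x xs y ys hnlt hnlt' ih =>
    intro hxs hys
    have hxy : x = y := le_antisymm (not_lt.mp hnlt') (not_lt.mp hnlt)
    subst hxy
    obtain ⟨hx1, hxs'⟩ := List.pairwise_cons.mp hxs
    obtain ⟨hy1, hys'⟩ := List.pairwise_cons.mp hys
    have hcongr1 : ∀ a ∈ xs, ((x :: ys).contains a) = (ys.contains a) := by
      intro a ha
      have hne : a ≠ x := fun he => lt_irrefl x (he ▸ hx1 a ha)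
      simp [List.contains_cons, hne]
    have hcongr2 : ∀ a ∈ ys, ((x :: xs).contains a) = (xs.contains a) := by
      intro a ha
      have hne : a ≠ x := fun he => lt_irrefl x (he ▸ hy1 a ha)
      simp [List.contains_cons, hne]
    have e1 : xs.filter (fun a => !(x :: ys).contains a) = xs.filter (fun a => !ys.contains a) :=
      List.filter_congr (fun a ha => by rw [hcongr1 a ha])
    have e2 : ys.filter (fun a => !(x :: xs).contains a) = ys.filter (fun a => !xs.contains a) :=
      List.filter_congr (fun a ha => by rw [hcongr2 a ha])
    have e3 : xs.filter (fun a => (x :: ys).contains a) = xs.filter (fun a => ys.contains a) :=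
      List.filter_congr (fun a ha => by rw [hcongr1 a ha])
    have hcx : ((x :: ys).contains x) = true := by simp
    have hcx' : ((x :: xs).contains x) = true := by simp
    simp only [pvMergeB, if_neg hnlt, if_neg hnlt']
    rw [ih hxs' hys']
    simp only [List.filter_cons, hcx, hcx', e1, e2, e3]
    simp only [pvSig, pvLine]
    by_cases h : (((PySem.Dict.ofList (cd.getD x [])).get? "signature").getD "" != ((PySem.Dict.ofList (od.getD x [])).get? "signature").getD "") = true
    · simp [h, pvLine, pvSig, List.filter_filter, Bool.and_comm]
    · simp [h, pvLine, pvSig, List.filter_filter, Bool.and_comm]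

-- a filter of a sorted list is the sorted list of the matching subset
lemma pvFilterSorted (q : String → Bool) (xs ys : List String) (hx : xs.Nodup) (hy : ys.Nodup)
    (hmem : ∀ a, a ∈ ys ↔ a ∈ xs ∧ q a = true) :
    (PySem.List.sorted xs (fun x => x) false).filter q = PySem.List.sorted ys (fun x => x) false := by
  have hperm : ((PySem.List.sorted xs (fun x => x) false).filter q).Perm ys := by
    have hnd : (PySem.List.sorted xs (fun x => x) false).Nodup :=
      (PySem.List.sorted_perm xs (fun x => x) false).symm.nodup hx
    rw [List.perm_ext_iff_of_nodup (hnd.filter q) hy]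
    intro a
    rw [List.mem_filter, hmem, PySem.List.mem_sorted]
  have hlt : ((PySem.List.sorted xs (fun x => x) false).filter q).Pairwise (fun a b => a < b) := by
    have hnd : (PySem.List.sorted xs (fun x => x) false).Nodup :=
      (PySem.List.sorted_perm xs (fun x => x) false).symm.nodup hx
    have hle := PySem.List.sorted_pairwise xs (fun x => x)
    have : (PySem.List.sorted xs (fun x => x) false).Pairwise (fun a b => a < b) := by
      refine (hle.and hnd).imp ?_
      rintro a b ⟨h1, h2⟩
      exact lt_of_le_of_ne h1 h2
    exact this.filter q
  exact (PySem.List.sorted_eq_of_perm_of_pairwise_lt _ _ _ hperm hlt).symm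

theorem pv_main (label : String) (canonical other : List (String × List (String × String))) :
    compare_signature_sets label canonical other = compare_signature_sets_alt label canonical other := by
  set CD := PySem.Dict.ofList canonical with hCD
  set OD := PySem.Dict.ofList other with hOD
  set CK := PySem.Set.ofList CD.keys with hCK
  set OK := PySem.Set.ofList OD.keys with hOK
  have hcknd : CD.keys.Nodup := PySem.Dict.nodup_keys_ofList canonical
  have hoknd : OD.keys.Nodup := PySem.Dict.nodup_keys_ofList other
  set M := PySem.List.sorted (PySem.Set.diff CK OK) (fun x => x) false with hM
  set E := PySem.List.sorted (PySem.Set.diff OK CK) (fun x => x) false with hE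
  set I := PySem.List.sorted (PySem.Set.inter CK OK) (fun x => x) false with hI
  set ck := PySem.List.sorted CD.keys (fun x => x) false with hck
  set ok := PySem.List.sorted OD.keys (fun x => x) false with hok
  have hckp : ck.Pairwise (· < ·) := by
    have hnd : ck.Nodup := (PySem.List.sorted_perm CD.keys (fun x => x) false).symm.nodup hcknd
    refine ((PySem.List.sorted_pairwise CD.keys (fun x => x)).and hnd).imp ?_
    rintro a b ⟨h1, h2⟩
    exact lt_of_le_of_ne h1 h2
  have hokp : ok.Pairwise (· < ·) := by
    have hnd : ok.Nodup := (PySem.List.sorted_perm OD.keys (fun x => x) false).symm.nodup hoknd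
    refine ((PySem.List.sorted_pairwise OD.keys (fun x => x)).and hnd).imp ?_
    rintro a b ⟨h1, h2⟩
    exact lt_of_le_of_ne h1 h2
  have hmemok : ∀ a : String, ok.contains a = true ↔ a ∈ OD.keys := by
    intro a
    rw [List.contains_iff_mem, hok, PySem.List.mem_sorted]
  have hmemck : ∀ a : String, ck.contains a = true ↔ a ∈ CD.keys := by
    intro a
    rw [List.contains_iff_mem, hck, PySem.List.mem_sorted]
  -- the three components of the merge
  have hmiss : ck.filter (fun a => !ok.contains a) = M := by
    rw [hM, hck]
    apply pvFilterSorted _ _ _ hcknd (PySem.Set.nodup_diff _ _ (PySem.Set.nodup_ofList _))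
    intro a
    simp [hCK, hOK, PySem.Set.mem_diff, PySem.Set.mem_ofList, hok, PySem.List.mem_sorted,
      List.contains_iff_mem]
  have hextra : ok.filter (fun a => !ck.contains a) = E := by
    rw [hE, hok]
    apply pvFilterSorted _ _ _ hoknd (PySem.Set.nodup_diff _ _ (PySem.Set.nodup_ofList _))
    intro a
    simp [hCK, hOK, PySem.Set.mem_diff, PySem.Set.mem_ofList, hck, PySem.List.mem_sorted,
      List.contains_iff_mem]
  have hinter : ck.filter (fun a => ok.contains a) = I := by
    rw [hI, hck]
    apply pvFilterSorted _ _ _ hcknd (PySem.Set.nodup_inter _ _ (PySem.Set.nodup_ofList _))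
    intro a
    simp [hCK, hOK, PySem.Set.mem_inter, PySem.Set.mem_ofList, hok, PySem.List.mem_sorted,
      List.contains_iff_mem]
  -- rewrite both ports
  have hA : compare_signature_sets label canonical other =
      I.foldl (pvStepA label CD OD)
        ((if M.isEmpty then ([] : List String) else [label ++ ": missing methods: " ++ PySem.Str.join ", " M]) ++
         (if E.isEmpty then ([] : List String) else [label ++ ": unexpected methods: " ++ PySem.Str.join ", " E])) := by
    simp only [compare_signature_sets]
    rw [← hCD, ← hOD, ← hCK, ← hOK, ← hM, ← hE, ← hI]
    by_cases hm : M.isEmpty <;> by_cases he : E.isEmpty <;>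
      · simp [hm, he]
        apply PySem.List.foldl_congr_mem
        intro acc x _
        simp [pvStepA, pvSig, pvLine]
  have hB : compare_signature_sets_alt label canonical other =
      (let r := pvMergeB label CD OD ck ok
       ((if r.1.isEmpty then ([] : List String) else [label ++ ": missing methods: " ++ PySem.Str.join ", " r.1]) ++
        (if r.2.1.isEmpty then ([] : List String) else [label ++ ": unexpected methods: " ++ PySem.Str.join ", " r.2.1])) ++ r.2.2) := by
    rfl
  rw [hA, hB]
  simp only [pvMergeB_eq label CD OD ck ok hckp hokp, hmiss, hextra, hinter, pvFoldA]

-- ===== VERDICT (by name: the statement is the Claim_ definition above) =====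
theorem compare_signature_sets_spec : Claim_equal_compare_signature_sets := by
  intro label canonical other _ _
  unfold Spec_compare_signature_sets
  exact pv_main label canonical other
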